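-- pv_equiv track=rewrite | github.com/parhamsoltani/chebyshev_filter_eda | synthesis_methods.py | _create_auxiliary_poly
-- ===== SOURCE A (Python) =====
-- def _create_auxiliary_poly(n):
--     """Create auxiliary polynomial of degree n."""
--     poly_coeffs = [1, 0]  # Start with s
--     for i in range(1, n):
--         # Multiply by (s + i)
--         new_coeffs = [0] * (len(poly_coeffs) + 1)
--         for j, coeff in enumerate(poly_coeffs):
--             new_coeffs[j] += coeff * i
--             new_coeffs[j+1] += coeff
--         poly_coeffs = new_coeffs
--     return poly_coeffs
-- ===== SOURCE B (Python) =====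
-- def _create_auxiliary_poly(n):
--     """Create auxiliary polynomial of degree n (balanced product tree)."""
--     def mul(p, q):
--         r = [0] * (len(p) + len(q) - 1)
--         for i, a in enumerate(p):
--             for j, b in enumerate(q):
--                 r[i + j] += a * b
--         return r
--
--     def prod_tree(ks):
--         if not ks:
--             return [1]
--         if len(ks) == 1:
--             return [ks[0], 1]
--         m = len(ks) // 2
--         return mul(prod_tree(ks[:m]), prod_tree(ks[m:]))
--
--     return prod_tree(list(range(1, n))) + [0]
-- ===== Notes on version B (the rewrite author's own statement) =====
-- stated objective: alternative
-- what changed: Replaces A's sequential multiply-by-(s+i) accumulation with a balanced product tree over the linear factors combined by a generic polynomial-convolution routine.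
import Mathlib
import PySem

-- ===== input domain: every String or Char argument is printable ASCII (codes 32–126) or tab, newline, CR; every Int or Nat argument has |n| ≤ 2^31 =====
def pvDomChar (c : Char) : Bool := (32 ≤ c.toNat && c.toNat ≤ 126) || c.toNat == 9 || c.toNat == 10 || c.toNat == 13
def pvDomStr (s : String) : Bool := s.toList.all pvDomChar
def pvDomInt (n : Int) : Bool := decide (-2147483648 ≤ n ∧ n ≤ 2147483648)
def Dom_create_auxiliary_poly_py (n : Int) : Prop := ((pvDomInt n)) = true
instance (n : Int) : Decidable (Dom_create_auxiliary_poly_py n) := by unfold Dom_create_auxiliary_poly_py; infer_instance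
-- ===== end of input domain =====

-- B replaces A's sequential multiply-by-(s+i) accumulation with a balanced product tree of
-- the linear factors combined by a generic convolution (objective: alternative algorithm, not faster).

-- ===== PORT A =====
-- Python `r[k] += v` : every index written here is in range, so `List.modify` is exact.
def pvAddAt (r : List Int) (k : Nat) (v : Int) : List Int := r.modify k (· + v)

-- one iteration of A's outer loop: multiply poly_coeffs by (s + i)
def pvStepA (i : Int) (poly : List Int) : List Int :=
  (PySem.List.enumerate poly).foldl
    (fun nc jc => pvAddAt (pvAddAt nc jc.1.toNat (jc.2 * i)) (jc.1.toNat + 1) jc.2)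
    (List.replicate (poly.length + 1) 0)

def create_auxiliary_poly_py (n : Int) : List Int :=
  (PySem.List.pyRange 1 n 1).foldl (fun poly i => pvStepA i poly) [1, 0]

-- ===== PORT B =====
-- Source B's `mul`: r = [0]*(len(p)+len(q)-1); r[i+j] += a*b over all pairs (indices always in range)
def pvConv (p q : List Int) : List Int :=
  (PySem.List.enumerate p).foldl
    (fun r ia => (PySem.List.enumerate q).foldl
        (fun r jb => pvAddAt r (ia.1.toNat + jb.1.toNat) (ia.2 * jb.2)) r)
    (List.replicate (p.length + q.length - 1) 0)

-- Source B's `prod_tree`: balanced product of the factors (k + s); ks[:m]/ks[m:] with m = len//2 ≥ 0 are take/drop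
def pvProdTree : List Int → List Int
  | [] => [1]
  | [k] => [k, 1]
  | k1 :: k2 :: rest =>
      pvConv (pvProdTree ((k1 :: k2 :: rest).take ((k1 :: k2 :: rest).length / 2)))
             (pvProdTree ((k1 :: k2 :: rest).drop ((k1 :: k2 :: rest).length / 2)))
termination_by ks => ks.length
decreasing_by
  · simp; omega
  · simp; omega

def create_auxiliary_poly_py_alt (n : Int) : List Int :=
  pvProdTree (PySem.List.pyRange 1 n 1) ++ [0]

-- ===== PRECONDITION & SPEC =====
def Spec_create_auxiliary_poly_py (n : Int) (out : List Int) : Prop := out = create_auxiliary_poly_py_alt n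
instance (n : Int) (out : List Int) : Decidable (Spec_create_auxiliary_poly_py n out) := by unfold Spec_create_auxiliary_poly_py; infer_instance

-- ===== CLAIM (what is proved, stated in full; the proofs are below) =====
def Claim_equal_create_auxiliary_poly_py : Prop := ∀ (n : Int), Dom_create_auxiliary_poly_py n → Spec_create_auxiliary_poly_py n (create_auxiliary_poly_py n)

-- ===== LEMMAS AND PROOFS =====

-- coefficient-list semantics as a polynomial (lowest-degree first); proof-only helper
noncomputable def pvToPoly (p : List Int) : Polynomial Int :=
  p.foldr (fun a acc => Polynomial.C a + Polynomial.X * acc) 0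

theorem pvToPoly_nil : pvToPoly [] = 0 := rfl
theorem pvToPoly_cons (a : Int) (p : List Int) :
    pvToPoly (a :: p) = Polynomial.C a + Polynomial.X * pvToPoly p := rfl

theorem pvCoeff_toPoly (p : List Int) (k : Nat) : (pvToPoly p).coeff k = p.getD k 0 := by
  induction p generalizing k with
  | nil => simp [pvToPoly_nil]
  | cons a p ih =>
    rw [pvToPoly_cons]
    cases k with
    | zero => simp [Polynomial.mul_coeff_zero]
    | succ k =>
      rw [Polynomial.coeff_add, Polynomial.coeff_C, Polynomial.coeff_X_mul, ih]
      simp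

theorem pvLength_addAt (r : List Int) (k : Nat) (v : Int) :
    (pvAddAt r k v).length = r.length := List.length_modify ..

theorem pvGetD_addAt (r : List Int) (k : Nat) (v : Int) (j : Nat) :
    (pvAddAt r k v).getD j 0 =
      if j = k ∧ j < r.length then r.getD j 0 + v else r.getD j 0 := by
  unfold pvAddAt
  rw [List.getD_eq_getElem?_getD, List.getD_eq_getElem?_getD, List.getElem?_modify]
  by_cases h1 : j = k
  · subst h1
    by_cases h2 : j < r.length
    · rw [List.getElem?_eq_getElem h2]; simp [h2]
    · rw [List.getElem?_eq_none (by omega)]; simp [h2]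
  · by_cases h2 : j < r.length
    · rw [List.getElem?_eq_getElem h2]
      have hne : ¬ (k = j) := fun hc => h1 hc.symm
      simp [hne, h1]
    · rw [List.getElem?_eq_none (by omega)]; simp [h1, h2]

theorem pvFoldl_length_inv {α : Type} (step : List Int → α → List Int)
    (h : ∀ r x, (step r x).length = r.length) (l : List α) (r : List Int) :
    (l.foldl step r).length = r.length := by
  induction l generalizing r with
  | nil => rfl
  | cons x l ih => rw [List.foldl_cons, ih, h]

theorem pvGetD_replicate (n : Nat) (k : Nat) : (List.replicate n (0:Int)).getD k 0 = 0 := by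
  rw [List.getD_eq_getElem?_getD, List.getElem?_replicate]
  split <;> simp

-- inner loop of pvConv: add a * q into r starting at offset i0
theorem pvConv_inner_getD (q : List Int) (a : Int) (i0 : Nat) (k : Nat) :
    ∀ (s : Nat) (r : List Int), i0 + s + q.length ≤ r.length →
    ((PySem.List.enumerate q (s : Int)).foldl
        (fun r jb => pvAddAt r (i0 + jb.1.toNat) (a * jb.2)) r).getD k 0
      = r.getD k 0 +
        (if i0 + s ≤ k ∧ k < i0 + s + q.length then a * q.getD (k - (i0 + s)) 0 else 0) := by
  induction q with
  | nil =>
    intro s r h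
    rw [PySem.List.enumerate_nil, List.foldl_nil, List.length_nil, if_neg (by omega), add_zero]
  | cons b q ih =>
    intro s r h
    rw [PySem.List.enumerate_cons, List.foldl_cons]
    have hcast : (s : Int) + 1 = ((s + 1 : Nat) : Int) := by push_cast; ring
    rw [hcast, ih (s + 1) _ (by rw [pvLength_addAt]; simp at h; omega)]
    simp only [Int.toNat_natCast]
    rw [pvGetD_addAt]
    simp only [List.length_cons] at h ⊢
    by_cases hk : k = i0 + s
    · rw [if_pos ⟨hk, by omega⟩, if_neg (by omega), if_pos (by omega)]
      have h0 : k - (i0 + s) = 0 := by omega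
      rw [h0, List.getD_cons_zero]
      ring
    · rw [if_neg (by intro hc; exact hk hc.1)]
      by_cases hw : i0 + (s + 1) ≤ k ∧ k < i0 + (s + 1) + q.length
      · rw [if_pos hw, if_pos (by omega)]
        have hs : k - (i0 + s) = (k - (i0 + (s + 1))) + 1 := by omega
        rw [hs, List.getD_cons_succ]
      · rw [if_neg hw, if_neg (by omega)]

-- outer loop of pvConv
theorem pvConv_outer_getD (p q : List Int) (k : Nat) :
    ∀ (s : Nat) (r : List Int), s + p.length + q.length ≤ r.length + 1 →
    ((PySem.List.enumerate p (s : Int)).foldl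
        (fun r ia => (PySem.List.enumerate q).foldl
            (fun r jb => pvAddAt r (ia.1.toNat + jb.1.toNat) (ia.2 * jb.2)) r) r).getD k 0
      = r.getD k 0 + ∑ t ∈ Finset.range p.length,
          (if s + t ≤ k ∧ k < s + t + q.length then p.getD t 0 * q.getD (k - (s + t)) 0 else 0) := by
  induction p with
  | nil =>
    intro s r h
    rw [PySem.List.enumerate_nil, List.foldl_nil]
    simp
  | cons a p ih =>
    intro s r h
    rw [PySem.List.enumerate_cons, List.foldl_cons]
    have hcast : (s : Int) + 1 = ((s + 1 : Nat) : Int) := by push_cast; ring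
    have hlen : ((PySem.List.enumerate q).foldl
        (fun r jb => pvAddAt r ((s : Int).toNat + jb.1.toNat) (a * jb.2)) r).length = r.length :=
      pvFoldl_length_inv _ (fun r x => pvLength_addAt ..) _ _
    rw [hcast, ih (s + 1) _ (by rw [hlen]; simp at h; omega)]
    have hinner := pvConv_inner_getD q a (s : Int).toNat k 0 r
      (by simp only [Int.toNat_natCast]; simp at h; omega)
    simp only [Nat.cast_zero, Int.toNat_natCast, Nat.add_zero] at hinner
    simp only [Int.toNat_natCast]
    rw [hinner]
    simp only [List.length_cons]
    rw [Finset.sum_range_succ' (fun t => if s + t ≤ k ∧ k < s + t + q.length then (a :: p).getD t 0 * q.getD (k - (s + t)) 0 else 0) p.length]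
    simp only [List.getD_cons_succ, List.getD_cons_zero, Nat.add_zero]
    have harr : ∀ t, s + (t + 1) = (s + 1) + t := by omega
    have heq : ∑ t ∈ Finset.range p.length,
        (if s + (t + 1) ≤ k ∧ k < s + (t + 1) + q.length then p.getD t 0 * q.getD (k - (s + (t + 1))) 0 else 0)
      = ∑ t ∈ Finset.range p.length,
        (if (s + 1) + t ≤ k ∧ k < (s + 1) + t + q.length then p.getD t 0 * q.getD (k - ((s + 1) + t)) 0 else 0) := by
      apply Finset.sum_congr rfl; intro t _; rw [harr t]
    rw [heq]; ring

theorem pvLength_conv (p q : List Int) :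
    (pvConv p q).length = p.length + q.length - 1 := by
  unfold pvConv
  rw [pvFoldl_length_inv _ (fun r x => pvFoldl_length_inv _ (fun r y => pvLength_addAt ..) _ _) _ _]
  exact List.length_replicate

theorem pvGetD_conv (p q : List Int) (hq : q ≠ []) (k : Nat) :
    (pvConv p q).getD k 0
      = ∑ t ∈ Finset.range p.length,
          (if t ≤ k ∧ k < t + q.length then p.getD t 0 * q.getD (k - t) 0 else 0) := by
  have hql : 0 < q.length := List.length_pos_iff.mpr hq
  unfold pvConv
  have h := pvConv_outer_getD p q k 0 (List.replicate (p.length + q.length - 1) 0)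
    (by rw [List.length_replicate]; omega)
  simp only [Nat.cast_zero, zero_add] at h
  rw [h, pvGetD_replicate, zero_add]

theorem pvToPoly_conv (p q : List Int) (hq : q ≠ []) :
    pvToPoly (pvConv p q) = pvToPoly p * pvToPoly q := by
  apply Polynomial.ext; intro k
  rw [pvCoeff_toPoly, Polynomial.coeff_mul, pvGetD_conv p q hq k,
      Finset.Nat.sum_antidiagonal_eq_sum_range_succ_mk]
  simp only [pvCoeff_toPoly]
  have e1 : (∑ t ∈ Finset.range p.length,
        (if t ≤ k ∧ k < t + q.length then p.getD t 0 * q.getD (k - t) 0 else 0))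
      = ∑ t ∈ Finset.range p.length,
        (if t ≤ k then p.getD t 0 * q.getD (k - t) 0 else 0) := by
    apply Finset.sum_congr rfl
    intro t _
    by_cases h1 : t ≤ k
    · by_cases h2 : k < t + q.length
      · rw [if_pos ⟨h1, h2⟩, if_pos h1]
      · rw [if_neg (fun hc => h2 hc.2), if_pos h1,
            List.getD_eq_default q _ (show q.length ≤ k - t by omega), mul_zero]
    · rw [if_neg (fun hc => h1 hc.1), if_neg h1]
  have e2 : (∑ t ∈ Finset.range (k + 1), p.getD t 0 * q.getD (k - t) 0)
      = ∑ t ∈ Finset.range (k + 1),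
        (if t ≤ k then p.getD t 0 * q.getD (k - t) 0 else 0) := by
    apply Finset.sum_congr rfl
    intro t ht
    rw [if_pos (by simp at ht; omega)]
  rw [e1, e2]
  have e3 : (∑ t ∈ Finset.range p.length,
        (if t ≤ k then p.getD t 0 * q.getD (k - t) 0 else 0))
      = ∑ t ∈ Finset.range (max p.length (k + 1)),
        (if t ≤ k then p.getD t 0 * q.getD (k - t) 0 else 0) := by
    apply Finset.sum_subset (by intro x hx; simp only [Finset.mem_range] at hx ⊢; omega)
    intro t _ ht
    simp only [Finset.mem_range, not_lt] at ht
    by_cases h1 : t ≤ k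
    · rw [if_pos h1, List.getD_eq_default _ _ (by omega), zero_mul]
    · rw [if_neg h1]
  have e4 : (∑ t ∈ Finset.range (k + 1),
        (if t ≤ k then p.getD t 0 * q.getD (k - t) 0 else 0))
      = ∑ t ∈ Finset.range (max p.length (k + 1)),
        (if t ≤ k then p.getD t 0 * q.getD (k - t) 0 else 0) := by
    apply Finset.sum_subset (by intro x hx; simp only [Finset.mem_range] at hx ⊢; omega)
    intro t _ ht
    simp only [Finset.mem_range, not_lt] at ht
    rw [if_neg (by omega)]
  rw [e3, e4]

-- A's inner loop
theorem pvStepA_fold_getD (p : List Int) (i : Int) (k : Nat) :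
    ∀ (s : Nat) (r : List Int), s + p.length < r.length →
    ((PySem.List.enumerate p (s : Int)).foldl
        (fun nc jc => pvAddAt (pvAddAt nc jc.1.toNat (jc.2 * i)) (jc.1.toNat + 1) jc.2) r).getD k 0
      = r.getD k 0 +
        (if s ≤ k ∧ k < s + p.length then p.getD (k - s) 0 * i else 0) +
        (if s + 1 ≤ k ∧ k < s + 1 + p.length then p.getD (k - (s + 1)) 0 else 0) := by
  induction p with
  | nil =>
    intro s r h
    rw [PySem.List.enumerate_nil, List.foldl_nil, List.length_nil,
        if_neg (by omega), if_neg (by omega)]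
    ring
  | cons a p ih =>
    intro s r h
    rw [PySem.List.enumerate_cons, List.foldl_cons]
    have hcast : (s : Int) + 1 = ((s + 1 : Nat) : Int) := by push_cast; ring
    simp only [Int.toNat_natCast]
    simp only [List.length_cons] at h ⊢
    rw [hcast, ih (s + 1) _ (by rw [pvLength_addAt, pvLength_addAt]; omega)]
    rw [pvGetD_addAt, pvLength_addAt, pvGetD_addAt]
    have hcons : ∀ m : Nat, (a :: p).getD m 0 = if m = 0 then a else p.getD (m - 1) 0 := by
      intro m; cases m <;> simp
    rw [hcons (k - s), hcons (k - (s + 1))]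
    have hs1 : k - s - 1 = k - (s + 1) := by omega
    rw [hs1]
    split_ifs <;> (try ring) <;> (try omega) <;>
      (rw [show k - (1 + s) - 1 = k - (2 + s) from by omega]; try ring)

theorem pvLength_stepA (i : Int) (p : List Int) :
    (pvStepA i p).length = p.length + 1 := by
  unfold pvStepA
  rw [pvFoldl_length_inv _ (fun r x => by rw [pvLength_addAt, pvLength_addAt]) _ _,
      List.length_replicate]

theorem pvGetD_stepA (i : Int) (p : List Int) (k : Nat) :
    (pvStepA i p).getD k 0
      = i * p.getD k 0 + (if k = 0 then 0 else p.getD (k - 1) 0) := by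
  unfold pvStepA
  have h := pvStepA_fold_getD p i k 0 (List.replicate (p.length + 1) 0)
    (by rw [List.length_replicate]; omega)
  simp only [Nat.cast_zero, zero_add, Nat.sub_zero] at h
  rw [h, pvGetD_replicate, zero_add]
  have hd : ∀ (m : Nat), p.length ≤ m → p.getD m 0 = 0 :=
    fun m hm => List.getD_eq_default _ _ hm
  by_cases h0 : k = 0
  · subst h0
    rw [if_neg (show ¬(1 ≤ 0 ∧ 0 < 1 + p.length) by omega), if_pos (rfl : (0:Nat) = 0)]
    by_cases hp : 0 < p.length
    · rw [if_pos ⟨le_refl 0, hp⟩]; ring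
    · rw [if_neg (fun hc => hp hc.2), hd 0 (by omega)]; ring
  · rw [if_neg h0]
    by_cases hA : k < p.length
    · rw [if_pos ⟨by omega, hA⟩, if_pos ⟨by omega, by omega⟩]; ring
    · by_cases hB : k < 1 + p.length
      · rw [if_neg (by omega), if_pos ⟨by omega, hB⟩, hd k (by omega)]; ring
      · rw [if_neg (by omega), if_neg (by omega), hd k (by omega), hd (k - 1) (by omega)]
        ring

theorem pvToPoly_stepA (i : Int) (p : List Int) :
    pvToPoly (pvStepA i p) = (Polynomial.C i + Polynomial.X) * pvToPoly p := by
  apply Polynomial.ext; intro k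
  rw [pvCoeff_toPoly, pvGetD_stepA, add_mul, Polynomial.coeff_add, Polynomial.coeff_C_mul,
      pvCoeff_toPoly]
  cases k with
  | zero => rw [Polynomial.mul_coeff_zero, Polynomial.coeff_X_zero, zero_mul, if_pos rfl]
  | succ k =>
    rw [Polynomial.coeff_X_mul, pvCoeff_toPoly, if_neg (Nat.succ_ne_zero k),
        Nat.add_sub_cancel]

theorem pvLength_prodTree (ks : List Int) : (pvProdTree ks).length = ks.length + 1 := by
  induction ks using pvProdTree.induct with
  | case1 => simp [pvProdTree]
  | case2 k => simp [pvProdTree]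
  | case3 k1 k2 rest ih1 ih2 =>
    rw [pvProdTree, pvLength_conv, ih1, ih2]
    simp
    omega

theorem pvProdTree_ne_nil (ks : List Int) : pvProdTree ks ≠ [] := by
  have h := pvLength_prodTree ks
  intro hc; rw [hc] at h; simp at h

theorem pvToPoly_prodTree (ks : List Int) :
    pvToPoly (pvProdTree ks) = (ks.map (fun k => Polynomial.C k + Polynomial.X)).prod := by
  induction ks using pvProdTree.induct with
  | case1 => simp [pvProdTree, pvToPoly]
  | case2 k => simp [pvProdTree, pvToPoly]
  | case3 k1 k2 rest ih1 ih2 =>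
    rw [pvProdTree, pvToPoly_conv _ _ (pvProdTree_ne_nil _), ih1, ih2,
        ← List.prod_append, ← List.map_append, List.take_append_drop]

theorem pvToPoly_foldA (ks : List Int) (acc : List Int) :
    pvToPoly (ks.foldl (fun p i => pvStepA i p) acc)
      = (ks.map (fun k => Polynomial.C k + Polynomial.X)).prod * pvToPoly acc := by
  induction ks generalizing acc with
  | nil => simp
  | cons i ks ih =>
    rw [List.foldl_cons, ih, pvToPoly_stepA, List.map_cons, List.prod_cons]; ring

theorem pvLength_foldA (ks : List Int) (acc : List Int) :
    (ks.foldl (fun p i => pvStepA i p) acc).length = acc.length + ks.length := by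
  induction ks generalizing acc with
  | nil => rfl
  | cons i ks ih => rw [List.foldl_cons, ih, pvLength_stepA]; simp; omega

theorem pvToPoly_append_zero (l : List Int) : pvToPoly (l ++ [0]) = pvToPoly l := by
  induction l with
  | nil => simp [pvToPoly_nil, pvToPoly_cons]
  | cons a l ih => rw [List.cons_append, pvToPoly_cons, pvToPoly_cons, ih]

-- ===== VERDICT (by name: the statement is the Claim_ definition above) =====
theorem create_auxiliary_poly_py_spec : Claim_equal_create_auxiliary_poly_py := by
  intro n _
  unfold Spec_create_auxiliary_poly_py create_auxiliary_poly_py create_auxiliary_poly_py_alt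
  set ks := PySem.List.pyRange 1 n 1 with hks
  have hlen : (ks.foldl (fun p i => pvStepA i p) [1, 0]).length = (pvProdTree ks ++ [0]).length := by
    rw [pvLength_foldA, List.length_append, pvLength_prodTree]; simp; omega
  have hpoly : pvToPoly (ks.foldl (fun p i => pvStepA i p) [1, 0])
      = pvToPoly (pvProdTree ks ++ [0]) := by
    rw [pvToPoly_foldA, pvToPoly_append_zero, pvToPoly_prodTree]
    have h1 : pvToPoly [1, 0] = 1 := by
      simp [pvToPoly_cons, pvToPoly_nil]
    rw [h1, mul_one]
  apply List.ext_getElem hlen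
  intro k h1 h2
  have hc := pvCoeff_toPoly (ks.foldl (fun p i => pvStepA i p) [1, 0]) k
  have hc2 := pvCoeff_toPoly (pvProdTree ks ++ [0]) k
  rw [hpoly, hc2] at hc
  rw [List.getD_eq_getElem _ _ h1, List.getD_eq_getElem _ _ h2] at hc
  exact hc.symm
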